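-- pv_equiv track=rewrite | github.com/alexmasselot/password-checker | components/api/app/passwordChecker/complexity.py | password_length_score
-- ===== SOURCE A (Python) =====
-- def password_length_score(password: str):
--     """
--     Get a score based on the password length (source ???)
--
--     :param password: password string
--     :type password: str
--     :return: a value between 0 and 100
--     :rtype: int
--
--     >>> password_length_score('')
--     0
--     >>> password_length_score('1234')
--     0
--     >>> password_length_score('123456789')
--     32
--     >>> password_length_score('12345678901234567890')
--     100
--     """
--     # list of (len, score), sorted by len. We'll stop at the first one when the length is matching
--     score_thresholds = [(5, 0), (8, 16), (10, 32), (12, 48), (16, 64), (20, 80)]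
--
--     password_length = len(password)
--     matching_threshold = next((st for st in score_thresholds if password_length < st[0]), None)
--     if matching_threshold is None:
--         score = 100
--     else:
--         score = matching_threshold[1]
--
--     return score
-- ===== SOURCE B (Python) =====
-- def password_length_score(password):
--     bounds = [5, 8, 10, 12, 16, 20]
--     scores = [0, 16, 32, 48, 64, 80, 100]
--     x = len(password)
--     lo, hi = 0, len(bounds)
--     while lo < hi:
--         mid = (lo + hi) // 2
--         if x < bounds[mid]:
--             hi = mid
--         else:
--             lo = mid + 1
--     return scores[lo]
-- ===== Notes on version B (the rewrite author's own statement) =====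
-- stated objective: alternative
-- what changed: Replaces the first-match linear scan over (bound, score) pairs (with a None sentinel for the 100 bucket) by a hand-written binary search over a sorted bounds list indexing into a parallel scores list whose trailing entry covers lengths >= 20.
import Mathlib
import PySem

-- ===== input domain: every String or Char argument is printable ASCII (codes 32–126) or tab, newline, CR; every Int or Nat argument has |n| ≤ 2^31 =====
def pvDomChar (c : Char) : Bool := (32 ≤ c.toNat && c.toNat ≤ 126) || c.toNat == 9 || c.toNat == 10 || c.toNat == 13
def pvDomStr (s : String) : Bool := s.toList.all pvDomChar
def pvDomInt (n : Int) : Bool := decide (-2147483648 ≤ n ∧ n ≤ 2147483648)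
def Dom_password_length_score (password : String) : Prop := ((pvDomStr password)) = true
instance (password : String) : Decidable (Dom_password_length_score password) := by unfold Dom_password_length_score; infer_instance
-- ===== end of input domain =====

-- B replaces A's first-match linear scan over (bound, score) pairs by a binary search
-- over a sorted bounds list with a parallel scores list (alternative decomposition).


-- ===== PORT A =====
-- A's threshold table, and 'next(… if password_length < st[0] …, None)' as first-match scan
def pvThresholds : List (Int × Int) := [(5, 0), (8, 16), (10, 32), (12, 48), (16, 64), (20, 80)]

def pvFirstMatch (n : Int) : List (Int × Int) → Option (Int × Int)
  | [] => none
  | st :: rest => if n < st.1 then some st else pvFirstMatch n rest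

def password_length_score (password : String) : Int :=
  match pvFirstMatch (PySem.Str.len password) pvThresholds with
  | none => 100
  | some st => st.2

-- ===== PORT B =====
def pvBounds : List Int := [5, 8, 10, 12, 16, 20]
def pvScores : List Int := [0, 16, 32, 48, 64, 80, 100]

-- the while-loop of Source B, with a fuel bound (≥ hi - lo, so it never runs out);
-- indexing bounds[mid] is always in range (lo < hi ≤ 6)
def pvBisect (x : Int) : Nat → Nat → Nat → Nat
  | 0, lo, _ => lo
  | fuel + 1, lo, hi =>
    if lo < hi then
      let mid := (lo + hi) / 2
      if x < pvBounds.getD mid 0 then pvBisect x fuel lo mid else pvBisect x fuel (mid + 1) hi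
    else lo

def password_length_score_alt (password : String) : Int :=
  pvScores.getD (pvBisect (PySem.Str.len password) pvBounds.length 0 pvBounds.length) 0

-- ===== PRECONDITION & SPEC =====
def Spec_password_length_score (password : String) (out : Int) : Prop := out = password_length_score_alt password
instance (password : String) (out : Int) : Decidable (Spec_password_length_score password out) := by unfold Spec_password_length_score; infer_instance

-- ===== CLAIM (what is proved, stated in full; the proofs are below) =====
def Claim_equal_password_length_score : Prop := ∀ (password : String), Dom_password_length_score password → Spec_password_length_score password (password_length_score password)

-- ===== LEMMAS AND PROOFS =====
-- both results depend only on the length; for lengths ≥ 20 the scan finds nothing …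
theorem pvFirstMatch_big (x : Int) (hx : 20 ≤ x) : pvFirstMatch x pvThresholds = none := by
  simp only [pvThresholds, pvFirstMatch]
  repeat rw [if_neg (by omega)]

-- … and the binary search ends at index 6
theorem pvBisect_big (x : Int) (hx : 20 ≤ x) : pvBisect x 6 0 6 = 6 := by
  have h12 : ¬ x < 12 := by omega
  have h20 : ¬ x < 20 := by omega
  simp [pvBisect, pvBounds, h12, h20]

theorem pv_core (m : Nat) :
    (match pvFirstMatch (m : Int) pvThresholds with | none => (100 : Int) | some st => st.2)
      = pvScores.getD (pvBisect (m : Int) 6 0 6) 0 := by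
  by_cases h : m < 20
  · interval_cases m <;> decide
  · rw [pvFirstMatch_big _ (by omega), pvBisect_big _ (by omega)]; rfl

-- ===== VERDICT (by name: the statement is the Claim_ definition above) =====
theorem password_length_score_spec : Claim_equal_password_length_score := by
  intro p _
  show password_length_score p = password_length_score_alt p
  unfold password_length_score password_length_score_alt
  have hlen : PySem.Str.len p = ((p.toList.length : Nat) : Int) := by
    simp [PySem.Str.len_eq]
  rw [hlen]
  simpa [pvBounds] using pv_core p.toList.length
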